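-- pv_equiv track=rewrite | github.com/zhousc11/hbnu-nlp-homework | exp1/archive/forwardMatchSeg.py | forward_max_match
-- ===== SOURCE A (Python) =====
-- def forward_max_match(sentence, dictionary, max_word_length):
--     index = 0
--     result = []
--     while index < len(sentence):
--         word = None
--         for size in range(max_word_length, 0, -1):
--             if index + size > len(sentence):
--                 continue
--             piece = sentence[index:index + size]
--             if piece in dictionary:
--                 word = piece
--                 result.append(word)
--                 index += size
--                 break
--         if word is None:
--             word = sentence[index]
--             result.append(word)
--             index += 1
--     return result
-- ===== SOURCE B (Python) =====
-- def forward_max_match(sentence, dictionary, max_word_length):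
--     words = set(dictionary)
--     n = len(sentence)
--     result = []
--     i = 0
--     while i < n:
--         best = 1
--         limit = min(max_word_length, n - i)
--         for k in range(1, limit + 1):
--             if sentence[i:i + k] in words:
--                 best = k
--         result.append(sentence[i:i + best])
--         i += best
--     return result
-- ===== Notes on version B (the rewrite author's own statement) =====
-- stated objective: alternative
-- what changed: B builds a hash set of the dictionary once and, at each position, does a single ascending scan over candidate lengths keeping the longest hit (one append per position), instead of A's descending scan-with-break using an O(|dict|) list membership test per candidate; measured ~1.3x faster, below the 1.5x bar, so no speed claim.
import Mathlib
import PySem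

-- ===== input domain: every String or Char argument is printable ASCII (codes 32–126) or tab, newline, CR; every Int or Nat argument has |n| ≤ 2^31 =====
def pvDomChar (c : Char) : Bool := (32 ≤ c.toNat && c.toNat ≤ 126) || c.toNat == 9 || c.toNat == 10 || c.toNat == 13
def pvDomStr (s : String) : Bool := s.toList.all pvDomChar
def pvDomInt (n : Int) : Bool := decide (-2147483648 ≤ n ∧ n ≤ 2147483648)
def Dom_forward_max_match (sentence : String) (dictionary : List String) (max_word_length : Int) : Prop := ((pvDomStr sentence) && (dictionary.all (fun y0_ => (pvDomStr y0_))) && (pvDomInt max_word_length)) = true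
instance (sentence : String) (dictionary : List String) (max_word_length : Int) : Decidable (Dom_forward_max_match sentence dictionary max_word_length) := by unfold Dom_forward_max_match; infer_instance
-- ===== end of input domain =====

-- B builds the dictionary into a set once and scans candidate lengths upward keeping the
-- longest match (one append per position); A scans lengths downward with a list membership
-- test per candidate. Equal output proved for all inputs.

-- ===== PORT A =====
-- inner 'for size in range(max_word_length, 0, -1)' with its break: first matching size, descending
def fmmA_scan (l : List Char) (dictionary : List String) (index size : Int) : Option (String × Int) :=
  if _h : size ≤ 0 then none
  else if index + size > (l.length : Int) then fmmA_scan l dictionary index (size - 1)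
  else
    let piece := String.ofList (PySem.List.slice l (some index) (some (index + size)))
    if piece ∈ dictionary then some (piece, size)
    else fmmA_scan l dictionary index (size - 1)
termination_by size.toNat
decreasing_by all_goals omega

-- outer 'while index < len(sentence)' (index strictly increases, so len+1 fuel suffices)
def fmmA_loop (l : List Char) (dictionary : List String) (L index : Int) (result : List String) : Nat → List String
  | 0 => result
  | fuel+1 =>
    if index < (l.length : Int) then
      match fmmA_scan l dictionary index L with
      | some (w, s) => fmmA_loop l dictionary L (index + s) (result ++ [w]) fuel
      | none =>
        match PySem.List.pyGet? l index with
        | some c => fmmA_loop l dictionary L (index + 1) (result ++ [String.ofList [c]]) fuel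
        | none => result
    else result

def forward_max_match (sentence : String) (dictionary : List String) (max_word_length : Int) : List String :=
  fmmA_loop sentence.toList dictionary max_word_length 0 [] (sentence.toList.length + 1)

-- ===== PORT B =====
-- inner 'for k in range(1, limit + 1)': keep the last (= longest) k whose slice is in the word set
def fmmB_scan (l : List Char) (words : PySem.Set String) (i k limit best : Int) : Int :=
  if _h : limit < k then best
  else fmmB_scan l words i (k + 1) limit
        (if PySem.Set.contains words (String.ofList (PySem.List.slice l (some i) (some (i + k)))) then k else best)
termination_by (limit + 1 - k).toNat
decreasing_by omega

def fmmB_loop (l : List Char) (words : PySem.Set String) (L i : Int) (acc : List String) : Nat → List String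
  | 0 => acc
  | fuel+1 =>
    if i < (l.length : Int) then
      -- limit = min(max_word_length, n - i); best = fmmB_scan … 1 limit 1 (inlined)
      fmmB_loop l words L (i + fmmB_scan l words i 1 (min L ((l.length : Int) - i)) 1)
        (acc ++ [String.ofList (PySem.List.slice l (some i)
          (some (i + fmmB_scan l words i 1 (min L ((l.length : Int) - i)) 1)))]) fuel
    else acc

def forward_max_match_alt (sentence : String) (dictionary : List String) (max_word_length : Int) : List String :=
  fmmB_loop sentence.toList (PySem.Set.ofList dictionary) max_word_length 0 [] (sentence.toList.length + 1)

-- ===== PRECONDITION & SPEC =====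
def Spec_forward_max_match (sentence : String) (dictionary : List String) (max_word_length : Int) (out : List String) : Prop := out = forward_max_match_alt sentence dictionary max_word_length
instance (sentence : String) (dictionary : List String) (max_word_length : Int) (out : List String) : Decidable (Spec_forward_max_match sentence dictionary max_word_length out) := by unfold Spec_forward_max_match; infer_instance

-- ===== CLAIM (what is proved, stated in full; the proofs are below) =====
def Claim_equal_forward_max_match : Prop := ∀ (sentence : String) (dictionary : List String) (max_word_length : Int), Dom_forward_max_match sentence dictionary max_word_length → Spec_forward_max_match sentence dictionary max_word_length (forward_max_match sentence dictionary max_word_length)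

-- ===== LEMMAS AND PROOFS =====

-- greatest k in [1,m] whose slice at i is in the dictionary (shared characterisation of both scans)
def fmmGM (l : List Char) (dictionary : List String) (i : Int) : Nat → Option Nat
  | 0 => none
  | m+1 =>
    if String.ofList (PySem.List.slice l (some i) (some (i + ((m : Int) + 1)))) ∈ dictionary
    then some (m+1) else fmmGM l dictionary i m

theorem fmmA_scan_clip (l : List Char) (d : List String) (i : Int) (hi : i ≤ (l.length : Int)) :
    ∀ size : Int, fmmA_scan l d i size = fmmA_scan l d i (min size ((l.length : Int) - i)) := by
  intro size
  by_cases hle : size ≤ (l.length : Int) - i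
  · rw [min_eq_left hle]
  · have h0 : ¬ size ≤ 0 := by omega
    rw [fmmA_scan, dif_neg h0, if_pos (by omega : i + size > (l.length : Int))]
    have hmin : min size ((l.length : Int) - i) = min (size - 1) ((l.length : Int) - i) := by omega
    rw [hmin]
    exact fmmA_scan_clip l d i hi (size - 1)
termination_by size => size.toNat
decreasing_by omega

theorem fmmA_scan_gm (l : List Char) (d : List String) (i : Int) :
    ∀ m : Nat, i + (m : Int) ≤ (l.length : Int) →
      fmmA_scan l d i (m : Int) =
        (fmmGM l d i m).map
          (fun (k : Nat) => (String.ofList (PySem.List.slice l (some i) (some (i + (k : Int)))), (k : Int))) := by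
  intro m
  induction m with
  | zero => intro _; rw [fmmA_scan]; simp [fmmGM]
  | succ m ih =>
    intro hm
    rw [fmmA_scan, dif_neg (by push_cast; omega)]
    rw [if_neg (by push_cast at hm ⊢; omega)]
    unfold fmmGM
    push_cast
    by_cases hmem : String.ofList (PySem.List.slice l (some i) (some (i + ((m : Int) + 1)))) ∈ d
    · simp [hmem]
    · simp only [hmem, if_false]
      have hc : ((m : Int) + 1) - 1 = (m : Int) := by omega
      rw [hc]
      rw [ih (by push_cast at hm; omega)]

theorem fmmB_scan_top (l : List Char) (w : PySem.Set String) (i : Int) :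
    ∀ (k limit best : Int), k ≤ limit →
      fmmB_scan l w i k limit best =
        (if String.ofList (PySem.List.slice l (some i) (some (i + limit))) ∈ w
         then limit else fmmB_scan l w i k (limit - 1) best) := by
  intro k limit best hk
  rw [fmmB_scan, dif_neg (by omega)]
  by_cases hkl : k = limit
  · subst hkl
    rw [fmmB_scan, dif_pos (by omega)]
    by_cases hmem : String.ofList (PySem.List.slice l (some i) (some (i + k))) ∈ w
    · simp [hmem]
    · simp only [(by simp [hmem] :
        PySem.Set.contains w (String.ofList (PySem.List.slice l (some i) (some (i + k)))) = false),
        if_false, hmem]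
      rw [fmmB_scan, dif_pos (by omega)]
      simp
  · have hlt : k < limit := lt_of_le_of_ne hk hkl
    rw [fmmB_scan_top l w i (k + 1) limit _ (by omega)]
    by_cases hmem : String.ofList (PySem.List.slice l (some i) (some (i + limit))) ∈ w
    · simp [hmem]
    · simp only [hmem, if_false]
      conv_rhs => rw [fmmB_scan, dif_neg (by omega : ¬ limit - 1 < k)]
termination_by k limit best => (limit - k).toNat
decreasing_by omega

theorem fmmB_scan_gm (l : List Char) (d : List String) (i : Int) :
    ∀ (m : Nat) (best : Int), fmmB_scan l (PySem.Set.ofList d) i 1 ((m : Int)) best =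
      (match fmmGM l d i m with | some k => (k : Int) | none => best) := by
  intro m
  induction m with
  | zero => intro _b; rw [fmmB_scan]; simp [fmmGM]
  | succ m ih =>
    intro best
    rw [fmmB_scan_top l (PySem.Set.ofList d) i 1 _ best (by push_cast; omega)]
    unfold fmmGM
    push_cast
    by_cases hmem : String.ofList (PySem.List.slice l (some i) (some (i + ((m : Int) + 1)))) ∈ d
    · have hw : String.ofList (PySem.List.slice l (some i) (some (i + ((m : Int) + 1)))) ∈ PySem.Set.ofList d :=
        (PySem.Set.mem_ofList d _).mpr hmem
      simp [hw, hmem]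
    · have hw : String.ofList (PySem.List.slice l (some i) (some (i + ((m : Int) + 1)))) ∉ PySem.Set.ofList d :=
        fun h => hmem ((PySem.Set.mem_ofList d _).mp h)
      simp only [hw, if_false, hmem]
      have hc : ((m : Int) + 1) - 1 = (m : Int) := by omega
      rw [hc, ih best]

theorem fmm_slice_one (l : List Char) (i : Int) (h0 : 0 ≤ i) (hn : i < (l.length : Int)) :
    PySem.List.slice l (some i) (some (i + 1)) = [l[i.toNat]'(by omega)] := by
  rw [PySem.List.slice_toNat l h0 (by omega)]
  rw [(by omega : (i + 1).toNat - i.toNat = 1)]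
  rw [List.drop_eq_getElem_cons (by omega), List.take_succ_cons, List.take_zero]

theorem fmm_loop_eq (l : List Char) (d : List String) (L : Int) :
    ∀ (fuel : Nat) (i : Int) (acc : List String), 0 ≤ i →
      fmmA_loop l d L i acc fuel = fmmB_loop l (PySem.Set.ofList d) L i acc fuel := by
  intro fuel
  induction fuel with
  | zero => intro i acc _; rfl
  | succ fuel ih =>
    intro i acc h0
    rw [fmmA_loop, fmmB_loop]
    by_cases hlt : i < (l.length : Int)
    · rw [if_pos hlt, if_pos hlt]
      have hg : PySem.List.pyGet? l i = some (l[i.toNat]'(by omega)) :=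
        PySem.List.pyGet?_eq_some_getElem (xs := l) (i := i) h0 hlt
      have hclip := fmmA_scan_clip l d i (by omega) L
      by_cases hpos : 0 < min L ((l.length : Int) - i)
      · obtain ⟨m, hm⟩ : ∃ m : Nat, min L ((l.length : Int) - i) = (m : Int) :=
          ⟨(min L ((l.length : Int) - i)).toNat, by omega⟩
        have hA : fmmA_scan l d i L = (fmmGM l d i m).map
            (fun (k : Nat) => (String.ofList (PySem.List.slice l (some i) (some (i + (k : Int)))), (k : Int))) := by
          rw [hclip, hm]
          exact fmmA_scan_gm l d i m (by have := min_le_right L ((l.length : Int) - i); omega)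
        have hB : fmmB_scan l (PySem.Set.ofList d) i 1 (min L ((l.length : Int) - i)) 1 =
            (match fmmGM l d i m with | some k => ((k : Int)) | none => (1 : Int)) := by
          rw [hm]; exact fmmB_scan_gm l d i m 1
        cases hgm : fmmGM l d i m with
        | some k =>
          rw [hA, hgm, hB, hgm]
          simp only [Option.map_some]
          exact ih (i + (k : Int)) _ (by omega)
        | none =>
          rw [hA, hgm, hB, hgm]
          simp only [Option.map_none, hg]
          rw [fmm_slice_one l i h0 hlt]
          exact ih (i + 1) _ (by omega)
      · -- limit ≤ 0: no candidate sizes on either side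
        have hA : fmmA_scan l d i L = none := by
          rw [hclip, fmmA_scan, dif_pos (by omega)]
        have hB : fmmB_scan l (PySem.Set.ofList d) i 1 (min L ((l.length : Int) - i)) 1 = 1 := by
          rw [fmmB_scan, dif_pos (by omega)]
        rw [hA, hB, hg]
        simp only
        rw [fmm_slice_one l i h0 hlt]
        exact ih (i + 1) _ (by omega)
    · rw [if_neg hlt, if_neg hlt]

-- ===== VERDICT (by name: the statement is the Claim_ definition above) =====
theorem forward_max_match_spec : Claim_equal_forward_max_match := by
  intro sentence dictionary max_word_length _
  unfold Spec_forward_max_match forward_max_match forward_max_match_alt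
  exact fmm_loop_eq sentence.toList dictionary max_word_length _ 0 [] le_rfl
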